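-- pv_equiv track=rewrite | github.com/sivcovvladimir-cyber/aivideo | scripts/previews_from_pixverse_html_dump.py | pick_webp_motion_overlay
-- ===== SOURCE A (Python) =====
-- def strip_query(url: str) -> str:
--     return url.split("?", 1)[0]
--
-- def pick_webp_motion_overlay(imgs: list[str], poster: str) -> str | None:
--     """Первый .webp в порядке DOM; предпочтительно не совпадает с постером (jpg/png + webp overlay)."""
--     poster_s = strip_query(poster)
--     first: str | None = None
--     for u in imgs:
--         s = strip_query(u)
--         if not s.lower().endswith(".webp"):
--             continue
--         if first is None:
--             first = s
--         if s != poster_s: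
--             return s
--     return first
-- ===== SOURCE B (Python) =====
-- def strip_query(url: str) -> str:
--     return url.split("?", 1)[0]
--
-- def pick_webp_motion_overlay(imgs, poster):
--     """A's fallback 'first' webp always equals the stripped poster (otherwise the
--     loop returns early), so no accumulator is needed: look for a non-poster webp,
--     then fall back to the stripped poster itself iff it is a webp present in imgs."""
--     poster_s = strip_query(poster)
--     stripped = [strip_query(u) for u in imgs]
--     for s in stripped:
--         if s.lower().endswith(".webp") and s != poster_s:
--             return s
--     if poster_s.lower().endswith(".webp") and poster_s in stripped:
--         return poster_s
--     return None
-- ===== Notes on version B (the rewrite author's own statement) =====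
-- stated objective: simpler
-- what changed: B exploits the invariant that A's sticky 'first' accumulator can only ever hold the stripped poster (any other webp triggers the early return), so the accumulator disappears: B searches the stripped urls for a webp differing from the poster and otherwise falls back to the stripped poster itself, guarded by a membership test of it among the stripped urls.
import Mathlib
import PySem

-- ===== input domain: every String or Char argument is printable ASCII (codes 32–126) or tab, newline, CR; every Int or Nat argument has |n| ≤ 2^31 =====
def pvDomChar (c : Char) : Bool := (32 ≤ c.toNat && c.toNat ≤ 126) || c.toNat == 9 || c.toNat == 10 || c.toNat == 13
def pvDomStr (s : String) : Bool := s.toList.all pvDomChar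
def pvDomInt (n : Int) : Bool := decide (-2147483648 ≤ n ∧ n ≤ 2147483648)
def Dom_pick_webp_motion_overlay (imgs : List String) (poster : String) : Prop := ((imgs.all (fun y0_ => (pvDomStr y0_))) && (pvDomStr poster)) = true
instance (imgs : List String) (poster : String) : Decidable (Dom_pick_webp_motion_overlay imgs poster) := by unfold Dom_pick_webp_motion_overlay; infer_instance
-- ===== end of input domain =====

-- B drops A's sticky 'first' accumulator: a non-poster webp search plus a membership-test fallback (the fallback webp can only equal the stripped poster); objective: simpler. Return-value equivalence only.

-- ===== PORT A =====
-- url.split("?", 1)[0]: split with sep ≠ "" always yields a nonempty list, so headD "" is exact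
def strip_query (url : String) : String :=
  ((PySem.Str.splitMax? url "?" 1).getD []).headD ""

-- s.lower().endswith(".webp")
def isWebp (s : String) : Bool := PySem.Str.endswith (PySem.Str.lower s) ".webp"

-- A's loop: sticky 'first' accumulator, early return on a webp differing from the poster
def pickLoopA (ps : String) : List String → Option String → Option String
  | [], first => first
  | u :: rest, first =>
    let s := strip_query u
    if ¬ isWebp s then
      pickLoopA ps rest first
    else
      let first' := if first = none then some s else first
      if s ≠ ps then some s else pickLoopA ps rest first'

def pick_webp_motion_overlay (imgs : List String) (poster : String) : Option String :=
  pickLoopA (strip_query poster) imgs none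

-- ===== PORT B =====
def pick_webp_motion_overlay_alt (imgs : List String) (poster : String) : Option String :=
  let poster_s := strip_query poster
  let stripped := imgs.map strip_query
  match stripped.find? (fun s => isWebp s && s != poster_s) with
  | some s => some s
  | none =>
    if isWebp poster_s && stripped.contains poster_s then some poster_s else none

-- ===== PRECONDITION & SPEC =====
def Spec_pick_webp_motion_overlay (imgs : List String) (poster : String) (out : Option String) : Prop := out = pick_webp_motion_overlay_alt imgs poster
instance (imgs : List String) (poster : String) (out : Option String) : Decidable (Spec_pick_webp_motion_overlay imgs poster out) := by unfold Spec_pick_webp_motion_overlay; infer_instance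

-- ===== CLAIM (what is proved, stated in full; the proofs are below) =====
def Claim_equal_pick_webp_motion_overlay : Prop := ∀ (imgs : List String) (poster : String), Dom_pick_webp_motion_overlay imgs poster → Spec_pick_webp_motion_overlay imgs poster (pick_webp_motion_overlay imgs poster)

-- ===== LEMMAS AND PROOFS =====
-- unfolding equation for A's loop on a cons cell
theorem pickLoopA_cons (ps u : String) (rest : List String) (first : Option String) :
    pickLoopA ps (u :: rest) first =
      (if ¬ isWebp (strip_query u) then pickLoopA ps rest first
       else if strip_query u ≠ ps then some (strip_query u)
       else pickLoopA ps rest (if first = none then some (strip_query u) else first)) := rfl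

-- loop invariant: with 'first' restricted to none/some ps (the only values it takes),
-- A's loop is the non-poster-webp search with a poster-webp-occurrence fallback
theorem pickLoopA_eq (ps : String) (l : List String) (first : Option String)
    (hf : first = none ∨ first = some ps) :
    pickLoopA ps l first =
      (match (l.map strip_query).find? (fun s => isWebp s && s != ps) with
       | some s => some s
       | none =>
         if (l.map strip_query).any (fun s => isWebp s && s == ps) then some ps else first) := by
  induction l generalizing first with
  | nil => simp [pickLoopA]
  | cons u rest ih =>
    rw [pickLoopA_cons]
    by_cases hw : isWebp (strip_query u) = true
    · rw [if_neg (by simp [hw])]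
      by_cases hps : strip_query u = ps
      · rw [if_neg (by simp [hps])]
        have hwps : isWebp ps = true := hps ▸ hw
        have h1 : (isWebp (strip_query u) && (strip_query u != ps)) = false := by
          simp [hps]
        have h2 : (isWebp (strip_query u) && (strip_query u == ps)) = true := by
          simp [hps, hwps]
        have hfirst' : (if first = none then some (strip_query u) else first) = some ps := by
          rcases hf with h | h <;> simp [h, hps]
        rw [hfirst', ih (some ps) (Or.inr rfl)]
        simp only [List.map_cons, List.find?_cons, h1, List.any_cons, h2, Bool.true_or, if_true]
        cases (rest.map strip_query).find? (fun s => isWebp s && s != ps) <;> simp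
      · rw [if_pos hps]
        have h1 : (isWebp (strip_query u) && (strip_query u != ps)) = true := by
          simp [hw, hps]
        simp only [List.map_cons, List.find?_cons, h1]
    · have hw' : isWebp (strip_query u) = false := by
        cases h : isWebp (strip_query u) with
        | true => exact absurd h hw
        | false => rfl
      rw [if_pos (by simp [hw']), ih first hf]
      simp only [List.map_cons, List.find?_cons, List.any_cons, hw', Bool.false_and, Bool.false_or]

-- with no non-poster webp found, 'some webp equal to ps occurs' ⟺ 'ps is a webp and occurs'
theorem any_eq_contains (xs : List String) (ps : String) :
    xs.any (fun s => isWebp s && s == ps) = (isWebp ps && xs.contains ps) := by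
  induction xs with
  | nil => simp
  | cons x rest ih =>
    simp only [List.any_cons, ih, List.contains_cons]
    by_cases h : x = ps
    · subst h; cases isWebp x <;> simp
    · have h1 : (x == ps) = false := by simp [h]
      have h2 : (ps == x) = false := by
        simp only [beq_eq_false_iff_ne]
        exact fun e => h (Eq.symm e)
      simp [h1, h2]

-- ===== VERDICT (by name: the statement is the Claim_ definition above) =====
theorem pick_webp_motion_overlay_spec : Claim_equal_pick_webp_motion_overlay := by
  intro imgs poster _
  unfold Spec_pick_webp_motion_overlay pick_webp_motion_overlay pick_webp_motion_overlay_alt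
  rw [pickLoopA_eq _ _ _ (Or.inl rfl)]
  rw [any_eq_contains]
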